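-- pv_equiv track=rewrite | github.com/vigneshsabapathi/python-algorithms | bit_manipulation/excess_3_code_optimized.py | excess3_divmod
-- ===== SOURCE A (Python) =====
-- def excess3_divmod(number: int) -> str:
--     """
--     Excess-3 using divmod to extract digits arithmetically, then add 3.
--
--     >>> excess3_divmod(-2)
--     '0b0011'
--     >>> excess3_divmod(0)
--     '0b0011'
--     >>> excess3_divmod(3)
--     '0b0110'
--     >>> excess3_divmod(2)
--     '0b0101'
--     >>> excess3_divmod(20)
--     '0b01010011'
--     >>> excess3_divmod(120)
--     '0b010001010011'
--     """
--     n = max(0, number)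
--     if n == 0:
--         return "0b0011"
--     digits: list[str] = []
--     while n:
--         n, rem = divmod(n, 10)
--         digits.append(format(rem + 3, "04b"))
--     return "0b" + "".join(reversed(digits))
-- ===== SOURCE B (Python) =====
-- def excess3_divmod(number: int) -> str:
--     # Encode each decimal digit of max(0, number) directly from its string form,
--     # most-significant first: no divmod loop, no reversal; no special case needed for zero.
--     return "0b" + "".join(format(int(c) + 3, "04b") for c in str(max(0, number)))
-- ===== Notes on version B (the rewrite author's own statement) =====
-- stated objective: simpler
-- what changed: Replaced the little-endian divmod digit-extraction loop plus reversal with a single most-significant-first pass over str(max(0, number)), which also makes the n==0 special case disappear.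
import Mathlib
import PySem

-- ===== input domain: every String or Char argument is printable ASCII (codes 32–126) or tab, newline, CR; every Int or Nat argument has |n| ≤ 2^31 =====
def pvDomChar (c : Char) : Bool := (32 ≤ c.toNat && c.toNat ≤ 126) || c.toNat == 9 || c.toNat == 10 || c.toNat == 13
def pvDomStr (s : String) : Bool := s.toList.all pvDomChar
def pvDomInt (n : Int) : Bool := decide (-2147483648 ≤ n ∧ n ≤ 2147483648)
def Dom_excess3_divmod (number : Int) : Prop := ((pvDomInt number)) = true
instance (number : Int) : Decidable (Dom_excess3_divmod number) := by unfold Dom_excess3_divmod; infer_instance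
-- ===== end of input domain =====

-- B replaces A's little-endian divmod loop + reversal with one most-significant-first
-- pass over the decimal string of max(0, number); simpler, same asymptotic cost.

-- format(v, "04b"): binary digits of v left-padded with '0' to width 4 (exact for v ≥ 0;
-- both Pythons only call it with 3 ≤ v ≤ 12)
def enc4 (v : Int) : List Char :=
  let b := PySem.Int.toBinChars v
  List.replicate (4 - b.length) '0' ++ b

-- ===== PORT A =====
-- the 'while n:' loop; the loop is only reached with n ≥ 0 (n = max(0, number)), where
-- Python's divmod(n, 10) is exactly Nat division/remainder, so the state is kept as Nat
def loopA (n : Nat) (digits : List (List Char)) : List (List Char) :=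
  if n = 0 then digits
  else loopA (n / 10) (digits ++ [enc4 ((n % 10 : Nat) + 3)])
termination_by n
decreasing_by exact Nat.div_lt_self (Nat.pos_of_ne_zero (by assumption)) (by norm_num)

def excess3_divmod (number : Int) : String :=
  let n := max 0 number
  if n = 0 then "0b0011"
  else String.mk ('0' :: 'b' :: (loopA n.toNat []).reverse.flatten)

-- ===== PORT B =====
-- int(c) for a single character c, as in Source B's 'int(c) + 3'
def digOf (c : Char) : Int := (PySem.Int.ofChars? [c]).getD 0

def excess3_divmod_alt (number : Int) : String :=
  String.mk ('0' :: 'b' ::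
    ((PySem.Int.toChars (max 0 number)).map (fun c => enc4 (digOf c + 3))).flatten)

-- ===== PRECONDITION & SPEC =====
def Spec_excess3_divmod (number : Int) (out : String) : Prop := out = excess3_divmod_alt number
instance (number : Int) (out : String) : Decidable (Spec_excess3_divmod number out) := by unfold Spec_excess3_divmod; infer_instance

-- ===== CLAIM (what is proved, stated in full; the proofs are below) =====
def Claim_equal_excess3_divmod : Prop := ∀ (number : Int), Dom_excess3_divmod number → Spec_excess3_divmod number (excess3_divmod number)

-- ===== LEMMAS AND PROOFS =====

-- big-endian decimal digit characters, mirrors Nat.toDigitsCore's output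
def digBE (n : Nat) : List Char :=
  if n = 0 then []
  else digBE (n / 10) ++ [Nat.digitChar (n % 10)]
termination_by n
decreasing_by exact Nat.div_lt_self (Nat.pos_of_ne_zero (by assumption)) (by norm_num)

-- big-endian list of encoded digit blocks, the common shape of both sides
def encBE (n : Nat) : List (List Char) :=
  if n = 0 then []
  else encBE (n / 10) ++ [enc4 ((n % 10 : Nat) + 3)]
termination_by n
decreasing_by exact Nat.div_lt_self (Nat.pos_of_ne_zero (by assumption)) (by norm_num)

lemma encBE_zero : encBE 0 = [] := by rw [encBE]; rfl

lemma encBE_pos (n : Nat) (h : n ≠ 0) :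
    encBE n = encBE (n / 10) ++ [enc4 ((n % 10 : Nat) + 3)] := by
  rw [encBE, if_neg h]

lemma digBE_zero : digBE 0 = [] := by rw [digBE]; rfl

lemma digBE_pos (n : Nat) (h : n ≠ 0) :
    digBE n = digBE (n / 10) ++ [Nat.digitChar (n % 10)] := by
  rw [digBE, if_neg h]

lemma loopA_eq (n : Nat) : ∀ acc, loopA n acc = acc ++ (encBE n).reverse := by
  induction n using Nat.strong_induction_on with
  | _ n ih =>
    intro acc
    rw [loopA]
    by_cases h : n = 0
    · simp [h, encBE_zero]
    · rw [if_neg h, ih (n / 10) (Nat.div_lt_self (Nat.pos_of_ne_zero h) (by norm_num)),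
        encBE_pos n h]
      simp

lemma toDigitsCore_eq : ∀ (f n : Nat) (acc : List Char), n < 10 ^ f → 0 < n →
    Nat.toDigitsCore 10 f n acc = digBE n ++ acc := by
  intro f
  induction f with
  | zero => intro n acc h hn; omega
  | succ f ih =>
    intro n acc h hn
    rw [Nat.toDigitsCore]
    by_cases hd : n / 10 = 0
    · rw [if_pos hd]
      rw [digBE_pos n (by omega), hd, digBE_zero]
      simp
    · rw [if_neg hd]
      rw [ih (n / 10) _ (Nat.div_lt_of_lt_mul (by rw [Nat.pow_succ, Nat.mul_comm] at h; exact h))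
        (Nat.pos_of_ne_zero hd)]
      rw [digBE_pos n (by omega)]
      simp

lemma toDigits_eq (n : Nat) (hn : 0 < n) : Nat.toDigits 10 n = digBE n := by
  rw [Nat.toDigits]
  rw [toDigitsCore_eq (n + 1) n [] (lt_of_lt_of_le (Nat.lt_pow_self (by norm_num))
    (Nat.pow_le_pow_right (by norm_num) (Nat.le_succ n))) hn]
  simp

lemma digOf_digitChar (d : Nat) (hd : d < 10) : digOf (Nat.digitChar d) = (d : Int) := by
  interval_cases d <;> decide

lemma map_digBE (n : Nat) :
    (digBE n).map (fun c => enc4 (digOf c + 3)) = encBE n := by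
  induction n using Nat.strong_induction_on with
  | _ n ih =>
    by_cases h : n = 0
    · simp [h, digBE_zero, encBE_zero]
    · rw [digBE_pos n h, encBE_pos n h, List.map_append, List.map_cons, List.map_nil,
        ih (n / 10) (Nat.div_lt_self (Nat.pos_of_ne_zero h) (by norm_num)),
        digOf_digitChar (n % 10) (Nat.mod_lt n (by norm_num))]

-- ===== VERDICT (by name: the statement is the Claim_ definition above) =====
theorem excess3_divmod_spec : Claim_equal_excess3_divmod := by
  intro number _
  unfold Spec_excess3_divmod excess3_divmod excess3_divmod_alt
  by_cases h : max 0 number = 0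
  · rw [h]
    decide
  · rw [if_neg h]
    have hge : (0 : Int) ≤ max 0 number := le_max_left _ _
    have hpos : 0 < (max 0 number).toNat := by omega
    have hnlt : ¬ (max 0 number < 0) := by omega
    rw [loopA_eq, PySem.Int.toChars]
    simp only [hnlt, if_false]
    rw [toDigits_eq _ hpos, map_digBE]
    simp
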